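-- pv_equiv track=rewrite | github.com/emon4075/Data_Visualization_API | generateColor.py | generate_Color
-- ===== SOURCE A (Python) =====
-- def generate_Color(rating_Lists):
--     color_Lists = []
--     for i in rating_Lists:
--         if i <= 1199:
--             color_Lists.append("Grey")
--         elif i <= 1399:
--             color_Lists.append("Green")
--         elif i <= 1599:
--             color_Lists.append("Cyan")
--         elif i <= 1899:
--             color_Lists.append("Blue")
--         elif i <= 2099:
--             color_Lists.append("Violet")
--         elif i <= 2399:
--             color_Lists.append("Orange")
--         elif i <= 2999:
--             color_Lists.append("Red")
--         elif i >= 3000: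
--             color_Lists.append("Black")
--
--     return color_Lists
-- ===== SOURCE B (Python) =====
-- import bisect
--
-- _THRESHOLDS = [1199, 1399, 1599, 1899, 2099, 2399, 2999]
-- _COLORS = ["Grey", "Green", "Cyan", "Blue", "Violet", "Orange", "Red"]
--
-- def generate_Color(rating_Lists):
--     color_Lists = []
--     for i in rating_Lists:
--         idx = bisect.bisect_left(_THRESHOLDS, i)
--         if idx < len(_THRESHOLDS):
--             color_Lists.append(_COLORS[idx])
--         elif i >= 3000:
--             color_Lists.append("Black")
--     return color_Lists
-- ===== Notes on version B (the rewrite author's own statement) =====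
-- stated objective: idiomatic
-- what changed: Replaces the eight-branch if/elif chain with a sorted thresholds table looked up via bisect_left against a parallel colors list, keeping only the explicit >=3000 guard for 'Black'.
import Mathlib
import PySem

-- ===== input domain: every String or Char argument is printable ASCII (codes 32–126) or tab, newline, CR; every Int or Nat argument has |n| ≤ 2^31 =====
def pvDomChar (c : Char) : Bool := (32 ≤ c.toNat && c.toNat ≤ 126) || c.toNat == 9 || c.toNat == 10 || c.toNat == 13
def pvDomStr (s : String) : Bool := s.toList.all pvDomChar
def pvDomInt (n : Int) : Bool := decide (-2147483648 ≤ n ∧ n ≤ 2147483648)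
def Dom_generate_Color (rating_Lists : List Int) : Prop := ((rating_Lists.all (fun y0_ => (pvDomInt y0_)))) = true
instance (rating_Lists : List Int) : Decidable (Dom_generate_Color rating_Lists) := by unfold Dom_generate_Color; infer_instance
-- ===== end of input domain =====

-- B replaces A's eight-branch if/elif chain with a sorted thresholds table and a
-- bisect_left lookup into a parallel colors list (objective: idiomatic).


-- ===== PORT A =====
def generate_Color (rating_Lists : List Int) : List String :=
  rating_Lists.foldl (fun color_Lists i =>
    if i ≤ 1199 then color_Lists ++ ["Grey"]
    else if i ≤ 1399 then color_Lists ++ ["Green"]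
    else if i ≤ 1599 then color_Lists ++ ["Cyan"]
    else if i ≤ 1899 then color_Lists ++ ["Blue"]
    else if i ≤ 2099 then color_Lists ++ ["Violet"]
    else if i ≤ 2399 then color_Lists ++ ["Orange"]
    else if i ≤ 2999 then color_Lists ++ ["Red"]
    else if i ≥ 3000 then color_Lists ++ ["Black"]
    else color_Lists) []

-- ===== PORT B =====
def pvThresholds : List Int := [1199, 1399, 1599, 1899, 2099, 2399, 2999]
def pvColors : List String := ["Grey", "Green", "Cyan", "Blue", "Violet", "Orange", "Red"]

-- bisect.bisect_left on a sorted list: first index whose element is ≥ x (exact there)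
def pvBisectLeft (xs : List Int) (x : Int) : Nat := (xs.takeWhile (· < x)).length

def generate_Color_alt (rating_Lists : List Int) : List String :=
  rating_Lists.foldl (fun color_Lists i =>
    let idx := pvBisectLeft pvThresholds i
    if idx < pvThresholds.length then color_Lists ++ [pvColors.getD idx ""]
    else if i ≥ 3000 then color_Lists ++ ["Black"]
    else color_Lists) []

-- ===== PRECONDITION & SPEC =====
def Spec_generate_Color (rating_Lists : List Int) (out : List String) : Prop :=
  out = generate_Color_alt rating_Lists
instance (rating_Lists : List Int) (out : List String) : Decidable (Spec_generate_Color rating_Lists out) := by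
  unfold Spec_generate_Color; infer_instance

-- ===== CLAIM =====
def Claim_equal_generate_Color : Prop :=
  ∀ (rating_Lists : List Int), Dom_generate_Color rating_Lists →
    Spec_generate_Color rating_Lists (generate_Color rating_Lists)

-- ===== LEMMAS AND PROOFS =====
theorem pv_step_eq (color_Lists : List String) (i : Int) :
    (if i ≤ 1199 then color_Lists ++ ["Grey"]
     else if i ≤ 1399 then color_Lists ++ ["Green"]
     else if i ≤ 1599 then color_Lists ++ ["Cyan"]
     else if i ≤ 1899 then color_Lists ++ ["Blue"]
     else if i ≤ 2099 then color_Lists ++ ["Violet"]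
     else if i ≤ 2399 then color_Lists ++ ["Orange"]
     else if i ≤ 2999 then color_Lists ++ ["Red"]
     else if i ≥ 3000 then color_Lists ++ ["Black"]
     else color_Lists)
    = (let idx := pvBisectLeft pvThresholds i
       if idx < pvThresholds.length then color_Lists ++ [pvColors.getD idx ""]
       else if i ≥ 3000 then color_Lists ++ ["Black"]
       else color_Lists) := by
  by_cases h1 : i ≤ 1199
  · simp [pvBisectLeft, pvThresholds, pvColors, List.takeWhile, h1, show ¬(1199:Int) < i by omega]
  by_cases h2 : i ≤ 1399
  · simp [pvBisectLeft, pvThresholds, pvColors, List.takeWhile, h1, h2, show (1199:Int) < i by omega, show ¬(1399:Int) < i by omega]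
  by_cases h3 : i ≤ 1599
  · simp [pvBisectLeft, pvThresholds, pvColors, List.takeWhile, h1, h2, h3, show (1199:Int) < i by omega, show (1399:Int) < i by omega, show ¬(1599:Int) < i by omega]
  by_cases h4 : i ≤ 1899
  · simp [pvBisectLeft, pvThresholds, pvColors, List.takeWhile, h1, h2, h3, h4, show (1199:Int) < i by omega, show (1399:Int) < i by omega, show (1599:Int) < i by omega, show ¬(1899:Int) < i by omega]
  by_cases h5 : i ≤ 2099
  · simp [pvBisectLeft, pvThresholds, pvColors, List.takeWhile, h1, h2, h3, h4, h5, show (1199:Int) < i by omega, show (1399:Int) < i by omega, show (1599:Int) < i by omega, show (1899:Int) < i by omega, show ¬(2099:Int) < i by omega]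
  by_cases h6 : i ≤ 2399
  · simp [pvBisectLeft, pvThresholds, pvColors, List.takeWhile, h1, h2, h3, h4, h5, h6, show (1199:Int) < i by omega, show (1399:Int) < i by omega, show (1599:Int) < i by omega, show (1899:Int) < i by omega, show (2099:Int) < i by omega, show ¬(2399:Int) < i by omega]
  by_cases h7 : i ≤ 2999
  · simp [pvBisectLeft, pvThresholds, pvColors, List.takeWhile, h1, h2, h3, h4, h5, h6, h7, h1, show (1199:Int) < i by omega, show (1399:Int) < i by omega, show (1599:Int) < i by omega, show (1899:Int) < i by omega, show (2099:Int) < i by omega, show (2399:Int) < i by omega, show ¬(2999:Int) < i by omega]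
  simp [pvBisectLeft, pvThresholds, pvColors, List.takeWhile, h1, h2, h3, h4, h5, h6, h7, h1, show (3000:Int) ≤ i by omega, show (1199:Int) < i by omega, show (1399:Int) < i by omega, show (1599:Int) < i by omega, show (1899:Int) < i by omega, show (2099:Int) < i by omega, show (2399:Int) < i by omega, show (2999:Int) < i by omega]

theorem pv_fold_eq (xs : List Int) (acc : List String) :
    xs.foldl (fun color_Lists i =>
      if i ≤ 1199 then color_Lists ++ ["Grey"]
      else if i ≤ 1399 then color_Lists ++ ["Green"]
      else if i ≤ 1599 then color_Lists ++ ["Cyan"]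
      else if i ≤ 1899 then color_Lists ++ ["Blue"]
      else if i ≤ 2099 then color_Lists ++ ["Violet"]
      else if i ≤ 2399 then color_Lists ++ ["Orange"]
      else if i ≤ 2999 then color_Lists ++ ["Red"]
      else if i ≥ 3000 then color_Lists ++ ["Black"]
      else color_Lists) acc
    = xs.foldl (fun color_Lists i =>
        let idx := pvBisectLeft pvThresholds i
        if idx < pvThresholds.length then color_Lists ++ [pvColors.getD idx ""]
        else if i ≥ 3000 then color_Lists ++ ["Black"]
        else color_Lists) acc := by
  simp only [pv_step_eq]

-- ===== VERDICT =====
theorem generate_Color_spec : Claim_equal_generate_Color := by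
  intro xs _
  unfold Spec_generate_Color generate_Color generate_Color_alt
  exact pv_fold_eq xs []
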